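-- pv_equiv track=rewrite | github.com/VictorOdambatafwa22/phase3WK1_code_challenge | challenge3_consonant_value.py | consonants
-- ===== SOURCE A (Python) =====
-- def consonants(string):
--
--     consonants = []
--     consonants2 = []
--
--
--     alph=['a', 'b', 'c', 'd', 'e', 'f', 'g', 'h', 'i', 'j', 'k', 'l', 'm', 'n', 'o', 'p', 'q', 'r', 's', 't', 'u', 'v', 'w', 'x', 'y', 'z']
--
--     for char in string:
--
--         if char.lower() not in ['a', 'e', 'i', 'o', 'u',' '," "]:
--
--             char2=alph.index(char)+1
--
--             consonants.append(char2)
--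
--         else:
--             Sum = sum(consonants)
--             consonants = []
--             consonants2.append(Sum)
--
--         Sum2 = sum(consonants)
--         consonants2.append(Sum2)
--
--
--
--     print (max(consonants2))
--
--     return max(consonants2)
-- ===== SOURCE B (Python) =====
-- def consonants(string):
--     best = 0
--     cur = 0
--     for ch in string:
--         if ch.lower() in 'aeiou ':
--             cur = 0
--         else:
--             cur = cur + (ord(ch) - 96)
--         best = max(best, cur)
--     print(best)
--     return best
-- ===== Notes on version B (the rewrite author's own statement) =====
-- stated objective: faster
-- what changed: A appends each consonant's alphabet-index value to a run list, recomputes sum() of that list after every character, collects all partial sums in a second list and takes max() at the end; B keeps just two integers (current run sum via ord, best so far) in a single pass with no lists.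
import Mathlib
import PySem

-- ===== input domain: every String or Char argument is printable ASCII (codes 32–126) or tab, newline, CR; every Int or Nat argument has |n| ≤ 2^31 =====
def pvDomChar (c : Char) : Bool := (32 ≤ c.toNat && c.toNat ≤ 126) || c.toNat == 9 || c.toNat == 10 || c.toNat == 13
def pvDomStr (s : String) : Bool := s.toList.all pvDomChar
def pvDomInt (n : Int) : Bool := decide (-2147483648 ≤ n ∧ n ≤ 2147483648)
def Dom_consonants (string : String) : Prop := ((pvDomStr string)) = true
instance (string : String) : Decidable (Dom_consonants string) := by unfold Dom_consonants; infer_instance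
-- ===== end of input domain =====

-- B replaces A's list-of-partial-sums accumulation (with a per-character sum() recomputation
-- and a final max) by a single O(1)-state pass keeping the current run sum and the best so far.
-- A also prints the result; B prints too; the equivalence proved here is about the return value.

-- ===== PORT A =====
def pvAlph : List Char :=
  ['a', 'b', 'c', 'd', 'e', 'f', 'g', 'h', 'i', 'j', 'k', 'l', 'm',
   'n', 'o', 'p', 'q', 'r', 's', 't', 'u', 'v', 'w', 'x', 'y', 'z']

-- one loop iteration of A: state = (consonants, consonants2)
def pvStepA (st : List Int × List Int) (c : Char) : List Int × List Int :=
  let st' :=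
    if PySem.Chars.lowerChar c ∉ (['a', 'e', 'i', 'o', 'u', ' ', ' '] : List Char) then
      -- char2 = alph.index(char) + 1; index? = none is a ValueError, excluded by Pre_ (getD unreachable there)
      (st.1 ++ [(((PySem.List.index? pvAlph c).getD 0 : Nat) : Int) + 1], st.2)
    else
      ([], st.2 ++ [st.1.sum])
  (st'.1, st'.2 ++ [st'.1.sum])

def consonants (string : String) : Int :=
  let st := string.toList.foldl pvStepA ([], [])
  -- max(consonants2); none only for the empty string (ValueError), excluded by Pre_
  (PySem.List.max? st.2 (fun x => x)).getD 0

-- ===== PORT B =====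
-- one loop iteration of B: state = (best, cur)
def pvStepB (st : Int × Int) (c : Char) : Int × Int :=
  let cur := if PySem.Chars.lowerChar c ∈ "aeiou ".toList then 0 else st.2 + ((c.toNat : Int) - 96)
  (max st.1 cur, cur)

def consonants_alt (string : String) : Int :=
  (string.toList.foldl pvStepB (0, 0)).1

-- ===== PRECONDITION & SPEC =====
def pvValid : List Char :=
  [' ', 'a', 'b', 'c', 'd', 'e', 'f', 'g', 'h', 'i', 'j', 'k', 'l', 'm',
   'n', 'o', 'p', 'q', 'r', 's', 't', 'u', 'v', 'w', 'x', 'y', 'z',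
   'A', 'E', 'I', 'O', 'U']

-- Pre_ excludes exactly the inputs where A raises ValueError: the empty string (max([]))
-- and strings with a character that is neither a space, a lowercase letter nor an
-- uppercase vowel (alph.index fails on it).
def Pre_consonants (string : String) : Prop :=
  (!string.toList.isEmpty && string.toList.all (fun c => decide (c ∈ pvValid))) = true
instance (string : String) : Decidable (Pre_consonants string) := by unfold Pre_consonants; infer_instance

def pvWitness_consonants : String := "hi zw"

def Spec_consonants (string : String) (out : Int) : Prop := out = consonants_alt string
instance (string : String) (out : Int) : Decidable (Spec_consonants string out) := by unfold Spec_consonants; infer_instance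

-- ===== CLAIM (what is proved, stated in full; the proofs are below) =====
def Claim_equal_consonants : Prop := ∀ (string : String), Dom_consonants string → Pre_consonants string → Spec_consonants string (consonants string)

-- ===== LEMMAS AND PROOFS =====

-- per-character facts, decided over the 32 admissible characters
set_option maxRecDepth 4096 in
lemma pv_tests_agree : ∀ c ∈ pvValid,
    ((PySem.Chars.lowerChar c ∈ (['a', 'e', 'i', 'o', 'u', ' ', ' '] : List Char))
      ↔ (PySem.Chars.lowerChar c ∈ "aeiou ".toList)) := by
  intro c hc
  fin_cases hc <;> decide

set_option maxRecDepth 4096 in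
lemma pv_cons_val : ∀ c ∈ pvValid,
    PySem.Chars.lowerChar c ∉ "aeiou ".toList →
    (((PySem.List.index? pvAlph c).getD 0 : Nat) : Int) + 1 = (c.toNat : Int) - 96
      ∧ 2 ≤ (c.toNat : Int) - 96 := by
  intro c hc
  fin_cases hc <;> decide

-- loop invariant linking A's state to B's state, by induction from the right
lemma pvInv (l : List Char) (hv : ∀ c ∈ l, c ∈ pvValid) :
    (l.foldl pvStepA ([], [])).1.sum = (l.foldl pvStepB (0, 0)).2
    ∧ 0 ≤ (l.foldl pvStepB (0, 0)).2
    ∧ (l.foldl pvStepB (0, 0)).2 ≤ (l.foldl pvStepB (0, 0)).1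
    ∧ 0 ≤ (l.foldl pvStepB (0, 0)).1
    ∧ (∀ x ∈ (l.foldl pvStepA ([], [])).2, x ≤ (l.foldl pvStepB (0, 0)).1)
    ∧ (l ≠ [] → (l.foldl pvStepB (0, 0)).1 ∈ (l.foldl pvStepA ([], [])).2) := by
  induction l using List.reverseRecOn with
  | nil => simp
  | append_singleton t c ih =>
    have hvt : ∀ x ∈ t, x ∈ pvValid := fun x hx => hv x (by simp [hx])
    have hc : c ∈ pvValid := hv c (by simp)
    obtain ⟨h1, h2, h3, h4, h5, h6⟩ := ih hvt
    rw [List.foldl_append, List.foldl_append] at *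
    set a := t.foldl pvStepA ([], []) with ha
    set b := t.foldl pvStepB (0, 0) with hb
    simp only [List.foldl_cons, List.foldl_nil, pvStepA, pvStepB]
    have hiff := pv_tests_agree c hc
    by_cases hvow : PySem.Chars.lowerChar c ∈ "aeiou ".toList
    · -- vowel or space: cur resets to 0, A closes the run
      rw [if_neg (show ¬ (PySem.Chars.lowerChar c ∉ (['a', 'e', 'i', 'o', 'u', ' ', ' '] : List Char)) from fun h => h (hiff.mpr hvow)), if_pos hvow]
      have hmax : max b.1 0 = b.1 := max_eq_left h4
      refine ⟨by simp, le_refl 0, ?_, ?_, ?_, ?_⟩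
      · simp [h4]
      · simp [h4]
      · intro x hx
        simp only [List.sum_nil, List.append_assoc, List.mem_append, List.mem_singleton] at hx
        rcases hx with h | h | h
        · exact le_trans (h5 x h) (le_max_left _ _)
        · rw [h, h1]; exact le_trans h3 (le_max_left _ _)
        · rw [h]; exact le_max_right _ _
      · intro _
        rcases List.eq_nil_or_concat t with ht | ⟨t', c', ht⟩
        · subst ht
          simp only [ha, hb, List.foldl_nil] at *
          simp
        · have ht' : t ≠ [] := by simp [ht]
          rw [hmax]
          simp only [List.append_assoc, List.mem_append]
          exact Or.inl (h6 ht')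
    · -- consonant: value appended, cur grows
      rw [if_pos (show PySem.Chars.lowerChar c ∉ (['a', 'e', 'i', 'o', 'u', ' ', ' '] : List Char) from fun h => hvow (hiff.mp h)), if_neg hvow]
      obtain ⟨hval, hge2⟩ := pv_cons_val c hc hvow
      have hsum : (a.1 ++ [(((PySem.List.index? pvAlph c).getD 0 : Nat) : Int) + 1]).sum
          = b.2 + ((c.toNat : Int) - 96) := by
        rw [List.sum_append, List.sum_singleton, hval, h1]
      refine ⟨by simpa using hsum, by omega, le_max_right _ _, ?_, ?_, ?_⟩
      · exact le_trans h4 (le_max_left _ _)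
      · intro x hx
        simp only [List.mem_append, List.mem_singleton] at hx
        rcases hx with h | h
        · exact le_trans (h5 x h) (le_max_left _ _)
        · rw [h]; rw [show (a.1 ++ [(((PySem.List.index? pvAlph c).getD 0 : Nat) : Int) + 1]).sum = b.2 + ((c.toNat : Int) - 96) from hsum]
          exact le_max_right _ _
      · intro _
        by_cases hle : b.1 ≤ b.2 + ((c.toNat : Int) - 96)
        · rw [max_eq_right hle]
          simp only [List.mem_append, List.mem_singleton]
          exact Or.inr (by rw [hsum])
        · rw [max_eq_left (le_of_not_ge hle)]
          rcases List.eq_nil_or_concat t with ht | ⟨t', c', ht⟩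
          · exfalso
            subst ht
            simp only [ha, hb, List.foldl_nil] at *
            omega
          · have ht' : t ≠ [] := by simp [ht]
            exact List.mem_append_left _ (h6 ht')

lemma pv_main (l : List Char) (hne : l ≠ []) (hv : ∀ c ∈ l, c ∈ pvValid) :
    (PySem.List.max? (l.foldl pvStepA ([], [])).2 (fun x => x)).getD 0
      = (l.foldl pvStepB (0, 0)).1 := by
  obtain ⟨_, _, _, _, h5, h6⟩ := pvInv l hv
  have hb := h6 hne
  have hne2 : (l.foldl pvStepA ([], [])).2 ≠ [] := fun h => by rw [h] at hb; exact List.not_mem_nil hb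
  obtain ⟨m, hm⟩ : ∃ m, PySem.List.max? (l.foldl pvStepA ([], [])).2 (fun x => x) = some m := by
    rcases ho : PySem.List.max? (l.foldl pvStepA ([], [])).2 (fun x => x) with _ | m
    · exact absurd ((PySem.List.max?_eq_none_iff _ _).mp ho) hne2
    · exact ⟨m, rfl⟩
  have hmem := PySem.List.max?_mem hm
  have hmax := PySem.List.max?_isMax hm
  rw [hm]
  simp only [Option.getD_some]
  exact le_antisymm (h5 m hmem) (hmax _ hb)

-- ===== VERDICT (by name: the statement is the Claim_ definition above) =====
theorem consonants_spec : Claim_equal_consonants := by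
  intro s _ hpre
  unfold Pre_consonants at hpre
  simp only [Bool.and_eq_true, List.all_eq_true, decide_eq_true_eq, Bool.not_eq_true',
    List.isEmpty_eq_false_iff] at hpre
  obtain ⟨hne, hv⟩ := hpre
  unfold Spec_consonants consonants consonants_alt
  exact pv_main s.toList hne hv
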